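-- pv_equiv track=rewrite | github.com/laird-ikar/CTF | cryptography/hill_brutforce.py | strToVec
-- ===== SOURCE A (Python) =====
-- alphabet="ABCDEFGHIJKLMNOPQRSTUVWXYZ"
--
-- def strToVec(str, n):
--     if len(str) % n != 0:
--         raise ValueError
--     vec = []
--     for i in range(len(str) // n):
--         subvec = []
--         for j in range(n):
--             subvec.append(alphabet.index(str[i * n + j]))
--         vec.append(subvec)
--     return vec
-- ===== SOURCE B (Python) =====
-- alphabet = "ABCDEFGHIJKLMNOPQRSTUVWXYZ"
--
--
-- def strToVec(str, n):
--     if len(str) % n != 0: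
--         raise ValueError
--     chunks = [str[k:k + n] for k in range(0, len(str), n)]
--     return [[alphabet.index(c) for c in chunk] for chunk in chunks]
-- ===== Notes on version B (the rewrite author's own statement) =====
-- stated objective: simpler
-- what changed: Replaces A's nested index-arithmetic loops (i*n+j with repeated append) by slicing the string into consecutive chunks of length n and mapping alphabet.index over each chunk.
import Mathlib
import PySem

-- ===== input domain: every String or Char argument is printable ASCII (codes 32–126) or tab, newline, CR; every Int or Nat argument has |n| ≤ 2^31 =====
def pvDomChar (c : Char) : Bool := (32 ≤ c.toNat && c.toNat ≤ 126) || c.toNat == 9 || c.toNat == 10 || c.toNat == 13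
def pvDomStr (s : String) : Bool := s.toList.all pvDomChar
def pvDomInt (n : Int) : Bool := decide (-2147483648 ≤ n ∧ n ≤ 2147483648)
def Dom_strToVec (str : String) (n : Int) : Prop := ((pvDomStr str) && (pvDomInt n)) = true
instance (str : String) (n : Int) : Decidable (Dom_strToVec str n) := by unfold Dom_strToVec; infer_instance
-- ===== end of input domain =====

-- B replaces A's nested index-arithmetic loops by slicing into chunks and mapping over them (simpler decomposition; equal on the return value everywhere A returns).

def pvAlphabet : List Char := "ABCDEFGHIJKLMNOPQRSTUVWXYZ".toList

-- alphabet.index(c); Pre_ excludes the ValueError case (character not in the alphabet on a scanned position)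
def pvIdx (c : Char) : Int := ((PySem.List.index? pvAlphabet c).getD 0 : Nat)

-- ===== PORT A =====
def strToVec (str : String) (n : Int) : List (List Int) :=
  -- the 'if len(str) % n != 0: raise ValueError' guard only raises; Pre_ excludes it (and n = 0)
  let s := str.toList
  (PySem.List.pyRange 0 (PySem.Int.floordiv (s.length : Int) n) 1).foldl
    (fun vec i =>
      vec ++ [(PySem.List.pyRange 0 n 1).foldl
        (fun subvec j =>
          subvec ++ [((PySem.List.pyGet? s (i * n + j)).map pvIdx).getD 0]) []])
    []

-- ===== PORT B =====
def strToVec_alt (str : String) (n : Int) : List (List Int) :=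
  -- same guard, same exclusion via Pre_
  let s := str.toList
  let chunks := (PySem.List.pyRange 0 (s.length : Int) n).map
    (fun k => PySem.List.slice s (some k) (some (k + n)))
  chunks.map (fun chunk => chunk.map pvIdx)

-- ===== PRECONDITION & SPEC =====
-- Pre_ excludes exactly the inputs where A raises: n = 0 (ZeroDivisionError), len % n ≠ 0
-- (ValueError), and — for n > 0, where every character is scanned — a character outside the alphabet (ValueError).
def Pre_strToVec (str : String) (n : Int) : Prop :=
  n ≠ 0 ∧ PySem.Int.mod (str.toList.length : Int) n = 0 ∧
    (0 < n → str.toList.all (fun c => pvAlphabet.contains c) = true)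
instance (str : String) (n : Int) : Decidable (Pre_strToVec str n) := by
  unfold Pre_strToVec; infer_instance
def pvWitness_strToVec : String × Int := ("ABCD", 2)

def Spec_strToVec (str : String) (n : Int) (out : List (List Int)) : Prop := out = strToVec_alt str n
instance (str : String) (n : Int) (out : List (List Int)) : Decidable (Spec_strToVec str n out) := by unfold Spec_strToVec; infer_instance

-- ===== CLAIM (what is proved, stated in full; the proofs are below) =====
def Claim_equal_strToVec : Prop := ∀ (str : String) (n : Int), Dom_strToVec str n → Pre_strToVec str n → Spec_strToVec str n (strToVec str n)

-- ===== LEMMAS AND PROOFS =====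

theorem pv_canonical_A (str : String) (m nn : Nat) (hL : str.toList.length = m * nn)
    (hnn : 0 < nn) :
    strToVec str (nn : Int) =
      (List.range m).map (fun i => (List.range nn).map (fun j =>
        pvIdx (str.toList.getD (i * nn + j) 'A'))) := by
  have hdiv : PySem.Int.floordiv ((str.toList.length : Nat) : Int) ((nn : Nat) : Int) = ((m : Nat) : Int) := by
    rw [hL, PySem.Int.floordiv_natCast, Nat.mul_div_cancel _ hnn]
  simp only [strToVec, hdiv, PySem.List.pyRange_one,
    PySem.List.foldl_append_singleton_eq_map, List.nil_append, sub_zero,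
    Int.toNat_natCast, List.map_map]
  apply List.map_congr_left
  intro k hk
  rw [List.mem_range] at hk
  simp only [Function.comp]
  apply List.map_congr_left
  intro j hj
  rw [List.mem_range] at hj
  simp only [Function.comp_apply]
  have ht : k * nn + j < str.toList.length := by
    rw [hL]
    calc k * nn + j < k * nn + nn := by omega
    _ = (k + 1) * nn := by ring
    _ ≤ m * nn := Nat.mul_le_mul_right _ hk
  have harg : (0 + (k : Int)) * (nn : Int) + (0 + (j : Int)) = ((k * nn + j : Nat) : Int) := by
    push_cast; ring
  rw [harg, PySem.List.pyGet?_natCast, List.getElem?_eq_getElem ht]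
  simp [List.getElem?_eq_getElem ht]

theorem pv_canonical_B (str : String) (m nn : Nat) (hL : str.toList.length = m * nn)
    (hnn : 0 < nn) :
    strToVec_alt str (nn : Int) =
      (List.range m).map (fun i => (List.range nn).map (fun j =>
        pvIdx (str.toList.getD (i * nn + j) 'A'))) := by
  have hcnt : (PySem.List.pyRange 0 ((str.toList.length : Nat) : Int) ((nn : Nat) : Int)) =
      (List.range m).map (fun (k : Nat) => (0 : Int) + ((nn : Nat) : Int) * ((k : Nat) : Int)) := by
    rw [PySem.List.pyRange_of_pos _ _ (by exact_mod_cast hnn)]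
    congr 1
    rw [hL]
    by_cases hm : m = 0
    · simp [hm]
    · have hpos : (0 : Int) < ((m * nn : Nat) : Int) := by
        have : 0 < m * nn := Nat.mul_pos (Nat.pos_of_ne_zero hm) hnn
        exact_mod_cast this
      rw [if_pos hpos]
      have : ((m * nn : Nat) : Int) - 0 + (nn : Int) - 1 = ((nn : Int) - 1) + (m : Int) * (nn : Int) := by
        push_cast; ring
      rw [this, Int.add_mul_ediv_right _ _ (by exact_mod_cast hnn.ne')]
      rw [Int.ediv_eq_zero_of_lt (by omega) (by omega)]
      simp
  simp only [strToVec_alt, hcnt, List.map_map]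
  apply List.map_congr_left
  intro k hk
  rw [List.mem_range] at hk
  simp only [Function.comp]
  have h1 : (0 : Int) + (nn : Int) * (k : Int) = ((k * nn : Nat) : Int) := by push_cast; ring
  have h2 : (0 : Int) + (nn : Int) * (k : Int) + (nn : Int) = ((k * nn : Nat) : Int) + ((nn : Nat) : Int) := by
    push_cast; ring
  rw [h2, h1, PySem.List.slice_natCast_add]
  have hle : k * nn + nn ≤ str.toList.length := by
    rw [hL]
    calc k * nn + nn = (k + 1) * nn := by ring
    _ ≤ m * nn := Nat.mul_le_mul_right _ hk
  have hchunk : (str.toList.drop (k * nn)).take nn =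
      (List.range nn).map (fun j => str.toList.getD (k * nn + j) 'A') := by
    apply List.ext_getElem
    · simp only [List.length_take, List.length_drop, List.length_map, List.length_range]
      omega
    · intro i h1' h2'
      have hi : i < nn := by simp at h2'; omega
      have hti : k * nn + i < str.toList.length := by omega
      rw [List.getElem_take, List.getElem_drop]
      simp [List.getElem?_eq_getElem hti]
  rw [hchunk, List.map_map]
  apply List.map_congr_left
  intro j hj
  simp [Function.comp]

theorem pv_neg_A (str : String) (n : Int) (hn : n < 0) :
    strToVec str n = [] := by
  have hq : PySem.Int.floordiv ((str.toList.length : Nat) : Int) n ≤ 0 := by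
    by_contra h
    rw [not_le] at h
    have h1 : (1 : Int) ≤ PySem.Int.floordiv ((str.toList.length : Nat) : Int) n := h
    have hb := PySem.Int.mod_neg_bounds ((str.toList.length : Nat) : Int) hn
    have hf := PySem.Int.floordiv_mul_add_mod ((str.toList.length : Nat) : Int) n
    have hmul : PySem.Int.floordiv ((str.toList.length : Nat) : Int) n * n ≤ 1 * n :=
      mul_le_mul_of_nonpos_right h1 hn.le
    have h0 : (0 : Int) ≤ ((str.toList.length : Nat) : Int) := Int.natCast_nonneg _
    linarith
  simp only [strToVec]
  rw [PySem.List.pyRange_one_eq_nil hq]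
  rfl

theorem pv_neg_B (str : String) (n : Int) (hn : n < 0) :
    strToVec_alt str n = [] := by
  have h1 : ¬ (0 : Int) < n := by omega
  have h2 : ¬ ((str.toList.length : Nat) : Int) < 0 := by simp
  simp [strToVec_alt, PySem.List.pyRange, hn.ne, h1]

-- ===== VERDICT (by name: the statement is the Claim_ definition above) =====
theorem strToVec_spec : Claim_equal_strToVec := by
  intro str n _ hpre
  obtain ⟨hn0, hmod, _⟩ := hpre
  unfold Spec_strToVec
  rcases lt_trichotomy n 0 with hn | hn | hn
  · rw [pv_neg_A str n hn, pv_neg_B str n hn]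
  · exact absurd hn hn0
  · -- n > 0 : len = m * n
    have hdvd : n ∣ (str.toList.length : Int) := (PySem.Int.mod_eq_zero_iff_dvd _ _).mp hmod
    obtain ⟨nn, rfl⟩ : ∃ nn : Nat, n = (nn : Int) := ⟨n.toNat, (Int.toNat_of_nonneg hn.le).symm⟩
    have hnn : 0 < nn := by exact_mod_cast hn
    obtain ⟨m, hm⟩ : ∃ m : Nat, str.toList.length = m * nn := by
      obtain ⟨q, hq⟩ := hdvd
      have hq0 : 0 ≤ q := by
        rcases lt_or_ge q 0 with hneg | h
        · exfalso
          have : (nn : Int) * q < 0 := mul_neg_of_pos_of_neg hn hneg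
          have h0 : (0 : Int) ≤ (str.toList.length : Int) := Int.natCast_nonneg _
          omega
        · exact h
      refine ⟨q.toNat, ?_⟩
      have : ((str.toList.length : Nat) : Int) = ((q.toNat * nn : Nat) : Int) := by
        push_cast
        rw [Int.toNat_of_nonneg hq0]
        linarith [hq]
      exact_mod_cast this
    rw [pv_canonical_A str m nn hm hnn, pv_canonical_B str m nn hm hnn]
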